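-- pv_equiv track=rewrite | github.com/mbalos16/advent-of-code-2024 | day_03/part_two.py | create_new_input
-- ===== SOURCE A (Python) =====
-- def create_new_input(input_data):
--     allow_save = True
--     new_input = ""
--     i = 0
--     while i < len(input_data):
--         if input_data[i:].startswith("do()"):
--             allow_save = True
--         elif input_data[i:].startswith("don't()"):
--             allow_save = False
--         if allow_save == True:
--             new_input += input_data[i]
--         i += 1
--     return new_input
-- ===== SOURCE B (Python) =====
-- def create_new_input(input_data):
--     # Region-skipping with str.find instead of a per-character scan.
--     chunks = []
--     s = input_data
--     enabled = True
--     while s: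
--         if enabled:
--             j = s.find("don't()")
--             if j == -1:
--                 chunks.append(s)
--                 break
--             chunks.append(s[:j])
--             s = s[j + 7:]
--             enabled = False
--         else:
--             k = s.find("do()")
--             if k == -1:
--                 break
--             s = s[k:]
--             enabled = True
--     return "".join(chunks)
-- ===== Notes on version B (the rewrite author's own statement) =====
-- stated objective: faster
-- what changed: Replaced A's per-index startswith scan (which tests both markers at every character) by an alternating str.find loop that jumps directly between the next don't() and the next do(), collecting whole slices.
import Mathlib
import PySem

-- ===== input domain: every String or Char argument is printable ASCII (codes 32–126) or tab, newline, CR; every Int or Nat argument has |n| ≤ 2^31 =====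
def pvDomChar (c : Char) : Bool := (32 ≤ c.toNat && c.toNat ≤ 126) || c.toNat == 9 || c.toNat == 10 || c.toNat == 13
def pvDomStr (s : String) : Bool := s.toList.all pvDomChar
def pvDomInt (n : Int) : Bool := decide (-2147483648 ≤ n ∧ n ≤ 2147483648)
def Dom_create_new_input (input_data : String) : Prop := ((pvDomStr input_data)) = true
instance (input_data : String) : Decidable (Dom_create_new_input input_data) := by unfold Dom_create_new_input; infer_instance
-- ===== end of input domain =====

-- B replaces A's per-character scan (startswith at every index) by region skipping with
-- str.find: alternate between finding the next "don't()" (keep the slice before it) and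
-- the next "do()" (resume there); same return value, a different traversal.

-- ===== PORT A =====
-- the two marker strings, as char lists (shared vocabulary of both ports)
def pvDooMark : List Char := ['d', 'o', '(', ')']
def pvDontMark : List Char := ['d', 'o', 'n', '\'', 't', '(', ')']

-- A's while-loop over index i, as the obvious structural recursion over the suffix
-- input_data[i:]; state = allow_save, output built left to right.
def pvALoop : List Char → Bool → List Char
  | [], _ => []
  | c :: t, allow_save =>
    let a1 : Bool :=
      if PySem.Chars.startswith (c :: t) pvDooMark then true
      else if PySem.Chars.startswith (c :: t) pvDontMark then false
      else allow_save
    (if a1 then [c] else []) ++ pvALoop t a1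

def create_new_input (input_data : String) : String :=
  String.ofList (pvALoop input_data.toList true)

-- ===== PORT B =====
-- Source B's while-loop: s is the remaining suffix, enabled the mode; chunks are appended
-- as they are produced (the final "".join is the ++ of the recursion).
def pvBLoop (s : List Char) (enabled : Bool) : List Char :=
  if _hs : s = [] then []
  else if _he : enabled then
    let j : Int := PySem.Chars.find s pvDontMark
    if j = -1 then s
    else s.take j.toNat ++ pvBLoop (s.drop (j.toNat + 7)) false
  else
    let k : Int := PySem.Chars.find s pvDooMark
    if k = -1 then []
    else pvBLoop (s.drop k.toNat) true
termination_by 2 * s.length + (if enabled then 0 else 1)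
decreasing_by
  · have h0 : 0 < s.length := List.length_pos_iff.mpr _hs
    simp [List.length_drop, _he]
    omega
  · simp [List.length_drop, _he]

def create_new_input_alt (input_data : String) : String :=
  String.ofList (pvBLoop input_data.toList true)

-- ===== PRECONDITION & SPEC =====
def Spec_create_new_input (input_data : String) (out : String) : Prop := out = create_new_input_alt input_data
instance (input_data : String) (out : String) : Decidable (Spec_create_new_input input_data out) := by unfold Spec_create_new_input; infer_instance

-- ===== CLAIM (what is proved, stated in full; the proofs are below) =====
def Claim_equal_create_new_input : Prop := ∀ (input_data : String), Dom_create_new_input input_data → Spec_create_new_input input_data (create_new_input input_data)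

-- ===== LEMMAS AND PROOFS =====

-- startswith, as a Prop-level prefix test
lemma pv_sw_false {s p : List Char} (h : ¬ p <+: s) : PySem.Chars.startswith s p = false := by
  cases hb : PySem.Chars.startswith s p
  · rfl
  · exact absurd ((PySem.Chars.startswith_iff s p).mp hb) h

-- skipping the 7 characters of a "don't()" marker: the scan drops them all and ends up
-- disabled, whatever the incoming mode was
lemma pvALoop_dont (r : List Char) (b : Bool) : pvALoop (pvDontMark ++ r) b = pvALoop r false := by
  simp [pvDontMark, pvDooMark, pvALoop, PySem.Chars.startswith, List.isPrefixOf]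

-- enabled scan with no "don't()" anywhere keeps everything
lemma pvALoop_true_no_dont (cs : List Char) (h : ¬ pvDontMark <:+: cs) : pvALoop cs true = cs := by
  induction cs with
  | nil => simp [pvALoop]
  | cons c t ih =>
    rw [List.infix_cons_iff] at h
    push Not at h
    obtain ⟨h0, h1⟩ := h
    have hsw := pv_sw_false h0
    cases hdoo : PySem.Chars.startswith (c :: t) pvDooMark <;>
      simp [pvALoop, hdoo, hsw, ih h1]

-- enabled scan up to the first "don't()" occurrence keeps the prefix verbatim
lemma pvALoop_true_upto (j : ℕ) (cs : List Char) (hj : ∀ i < j, ¬ pvDontMark <+: cs.drop i) :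
    pvALoop cs true = cs.take j ++ pvALoop (cs.drop j) true := by
  induction j generalizing cs with
  | zero => simp
  | succ j ih =>
    cases cs with
    | nil => simp
    | cons c t =>
      have h0 : ¬ pvDontMark <+: (c :: t) := by simpa using hj 0 (Nat.succ_pos _)
      have hsw := pv_sw_false h0
      have hj' : ∀ i < j, ¬ pvDontMark <+: t.drop i := by
        intro i hi
        simpa using hj (i + 1) (by omega)
      cases hdoo : PySem.Chars.startswith (c :: t) pvDooMark <;>
        simp [pvALoop, hdoo, hsw, ih t hj']

-- disabled scan with no "do()" anywhere drops everything
lemma pvALoop_false_no_doo (cs : List Char) (h : ¬ pvDooMark <:+: cs) : pvALoop cs false = [] := by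
  induction cs with
  | nil => simp [pvALoop]
  | cons c t ih =>
    rw [List.infix_cons_iff] at h
    push Not at h
    obtain ⟨h0, h1⟩ := h
    have hsw := pv_sw_false h0
    cases hdont : PySem.Chars.startswith (c :: t) pvDontMark <;>
      simp [pvALoop, hdont, hsw, ih h1]

-- disabled scan skips up to the first "do()" occurrence
lemma pvALoop_false_upto (k : ℕ) (cs : List Char) (hk : ∀ i < k, ¬ pvDooMark <+: cs.drop i) :
    pvALoop cs false = pvALoop (cs.drop k) false := by
  induction k generalizing cs with
  | zero => simp
  | succ k ih =>
    cases cs with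
    | nil => simp
    | cons c t =>
      have h0 : ¬ pvDooMark <+: (c :: t) := by simpa using hk 0 (Nat.succ_pos _)
      have hsw := pv_sw_false h0
      have hk' : ∀ i < k, ¬ pvDooMark <+: t.drop i := by
        intro i hi
        simpa using hk (i + 1) (by omega)
      cases hdont : PySem.Chars.startswith (c :: t) pvDontMark <;>
        simp [pvALoop, hdont, hsw, ih t hk']

-- at a "do()" the mode flag is recomputed, so the two modes agree
lemma pvALoop_false_doo (cs : List Char) (h : pvDooMark <+: cs) : pvALoop cs false = pvALoop cs true := by
  obtain ⟨r, hr⟩ := h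
  subst hr
  simp [pvDooMark, pvALoop, PySem.Chars.startswith, List.isPrefixOf]

-- the main equivalence, both modes at once, by strong induction on the length
lemma pv_main : ∀ n : ℕ, ∀ cs : List Char, cs.length ≤ n →
    (pvALoop cs true = pvBLoop cs true) ∧ (pvALoop cs false = pvBLoop cs false) := by
  intro n
  induction n with
  | zero =>
    intro cs hcs
    cases cs with
    | nil => constructor <;> (rw [pvBLoop]; simp [pvALoop])
    | cons c t => simp at hcs
  | succ n ih =>
    intro cs hcs
    have htrue : pvALoop cs true = pvBLoop cs true := by
      by_cases hf : PySem.Chars.find cs pvDontMark = -1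
      · have hni : ¬ pvDontMark <:+: cs := (PySem.Chars.find_eq_neg_one_iff cs pvDontMark).mp hf
        rw [pvALoop_true_no_dont cs hni, pvBLoop]
        by_cases hcsnil : cs = [] <;> simp [hcsnil, hf]
      · have hge : 0 ≤ PySem.Chars.find cs pvDontMark := by
          have := PySem.Chars.neg_one_le_find cs pvDontMark
          omega
        obtain ⟨hpre, hmin⟩ := PySem.Chars.find_spec hge
        set j0 := (PySem.Chars.find cs pvDontMark).toNat with hj0
        obtain ⟨r, hr⟩ := hpre
        have hrdrop : cs.drop (j0 + 7) = r := by
          rw [← List.drop_drop, ← hr]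
          rfl
        have hj0le : j0 ≤ cs.length := by
          have h1 := PySem.Chars.find_le_length cs pvDontMark
          omega
        have hlen : j0 + 7 + r.length = cs.length := by
          have h2 := congrArg List.length hr
          simp [pvDontMark] at h2
          omega
        have hA : pvALoop cs true = cs.take j0 ++ pvALoop r false := by
          rw [pvALoop_true_upto j0 cs hmin, ← hr, pvALoop_dont]
        have hIH : pvALoop r false = pvBLoop r false := (ih r (by omega)).2
        have hcsne : cs ≠ [] := by
          intro hnil
          rw [hnil] at hlen
          simp at hlen
        have hB : pvBLoop cs true = cs.take j0 ++ pvBLoop (cs.drop (j0 + 7)) false := by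
          rw [pvBLoop]
          simp [hcsne, hf, ← hj0]
        rw [hA, hIH, hB, hrdrop]
    have hfalse : pvALoop cs false = pvBLoop cs false := by
      by_cases hk : PySem.Chars.find cs pvDooMark = -1
      · have hni : ¬ pvDooMark <:+: cs := (PySem.Chars.find_eq_neg_one_iff cs pvDooMark).mp hk
        rw [pvALoop_false_no_doo cs hni, pvBLoop]
        by_cases hcsnil : cs = [] <;> simp [hcsnil, hk]
      · have hge : 0 ≤ PySem.Chars.find cs pvDooMark := by
          have := PySem.Chars.neg_one_le_find cs pvDooMark
          omega
        obtain ⟨hpre, hmin⟩ := PySem.Chars.find_spec hge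
        set k0 := (PySem.Chars.find cs pvDooMark).toNat with hk0
        have hk0le : k0 ≤ cs.length := by
          have h1 := PySem.Chars.find_le_length cs pvDooMark
          omega
        have hlen4 : 4 ≤ cs.length - k0 := by
          have h2 := List.IsPrefix.length_le hpre
          simpa [pvDooMark] using h2
        have h1 : pvALoop cs false = pvALoop (cs.drop k0) false := pvALoop_false_upto k0 cs hmin
        have h2 : pvALoop (cs.drop k0) false = pvALoop (cs.drop k0) true := pvALoop_false_doo _ hpre
        have h3 : pvALoop (cs.drop k0) true = pvBLoop (cs.drop k0) true := by
          rcases Nat.eq_zero_or_pos k0 with h0 | h0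
          · rw [h0, List.drop_zero]
            exact htrue
          · refine (ih _ ?_).1
            simp only [List.length_drop]
            omega
        have hcsne : cs ≠ [] := by
          intro hnil
          rw [hnil] at hlen4
          simp at hlen4
        have hB : pvBLoop cs false = pvBLoop (cs.drop k0) true := by
          rw [pvBLoop]
          simp [hcsne, hk, ← hk0]
        rw [h1, h2, h3, hB]
    exact ⟨htrue, hfalse⟩

-- ===== VERDICT (by name: the statement is the Claim_ definition above) =====
theorem create_new_input_spec : Claim_equal_create_new_input := by
  intro s _
  unfold Spec_create_new_input create_new_input create_new_input_alt
  exact congrArg String.ofList ((pv_main s.toList.length s.toList le_rfl).1)
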